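-- pv_equiv track=rewrite | github.com/hoylemd/advent | 2021/2/main.py | follow_course
-- ===== SOURCE A (Python) =====
-- def parse_command(command):
--     parts = command.split()
--     return parts[0], int(parts[1])
--
-- def follow_course(course, start_x=0, start_y=0):
--     x = start_x
--     y = start_y
--     for direction, magnitude in (parse_command(command) for command in course):
--         if direction == 'up':
--             y -= magnitude
--         elif direction == 'down':
--             y += magnitude
--         elif direction == 'forward':
--             x += magnitude
--
--     return x, y
-- ===== SOURCE B (Python) =====
-- def parse_command(command):
--     parts = command.split()
--     return parts[0], int(parts[1])
--
-- def follow_course(course, start_x=0, start_y=0):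
--     parsed = [parse_command(c) for c in course]
--     x = start_x + sum(m for d, m in parsed if d == 'forward')
--     y = start_y + sum(m for d, m in parsed if d == 'down') \
--                 - sum(m for d, m in parsed if d == 'up')
--     return x, y
-- ===== Notes on version B (the rewrite author's own statement) =====
-- stated objective: simpler
-- what changed: Replaces the running if/elif (x,y) accumulator loop with one parse pass into a list followed by three grouped sums (forward, down, up) combined arithmetically.
import Mathlib
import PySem

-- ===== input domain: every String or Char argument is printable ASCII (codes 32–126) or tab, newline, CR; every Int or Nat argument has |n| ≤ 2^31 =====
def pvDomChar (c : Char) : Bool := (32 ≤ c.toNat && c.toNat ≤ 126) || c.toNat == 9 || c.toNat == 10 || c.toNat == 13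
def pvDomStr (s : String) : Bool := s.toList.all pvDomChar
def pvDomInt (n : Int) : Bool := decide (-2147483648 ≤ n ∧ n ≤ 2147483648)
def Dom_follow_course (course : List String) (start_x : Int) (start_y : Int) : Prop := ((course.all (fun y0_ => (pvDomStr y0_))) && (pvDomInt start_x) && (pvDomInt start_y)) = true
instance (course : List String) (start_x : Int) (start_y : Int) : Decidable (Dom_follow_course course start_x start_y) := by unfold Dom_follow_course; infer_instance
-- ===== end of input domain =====

-- B replaces A's running if/elif accumulator with one parse pass and three grouped sums (simpler decomposition, same cost).

-- ===== PORT A =====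
-- parse_command: parts[0] / int(parts[1]); total with defaults, exact under Pre_ (no IndexError/ValueError)
def parse_command (command : String) : String × Int :=
  let parts := PySem.Str.split₀ command
  ((PySem.List.pyGet? parts 0).getD "",
   (((PySem.List.pyGet? parts 1).getD "") |> PySem.Int.ofStr?).getD 0)

def follow_course (course : List String) (start_x : Int) (start_y : Int) : Int × Int :=
  course.foldl
    (fun xy command =>
      let dm := parse_command command
      if dm.1 = "up" then (xy.1, xy.2 - dm.2)
      else if dm.1 = "down" then (xy.1, xy.2 + dm.2)
      else if dm.1 = "forward" then (xy.1 + dm.2, xy.2)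
      else xy)
    (start_x, start_y)

-- ===== PORT B =====
def parse_command_b (command : String) : String × Int :=
  let parts := PySem.Str.split₀ command
  ((PySem.List.pyGet? parts 0).getD "",
   (((PySem.List.pyGet? parts 1).getD "") |> PySem.Int.ofStr?).getD 0)

def follow_course_alt (course : List String) (start_x : Int) (start_y : Int) : Int × Int :=
  let parsed := course.map parse_command_b
  let x := start_x + ((parsed.filter (fun p => p.1 == "forward")).map (fun p => p.2)).sum
  let y := start_y + ((parsed.filter (fun p => p.1 == "down")).map (fun p => p.2)).sum
                   - ((parsed.filter (fun p => p.1 == "up")).map (fun p => p.2)).sum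
  (x, y)

-- ===== PRECONDITION & SPEC =====
-- Pre_ excludes exactly the inputs where Python A raises: a command whose split has
-- fewer than 2 fields (IndexError) or whose second field int() rejects (ValueError).
def Pre_follow_course (course : List String) (start_x : Int) (start_y : Int) : Prop :=
  (course.all (fun c =>
    2 ≤ (PySem.Str.split₀ c).length &&
    (PySem.Int.ofStr? ((PySem.Str.split₀ c).getD 1 "")).isSome)) = true
instance (course : List String) (start_x : Int) (start_y : Int) : Decidable (Pre_follow_course course start_x start_y) := by unfold Pre_follow_course; infer_instance

def pvWitness_follow_course : List String × Int × Int := (["forward 5", "down 3", "up 1"], 0, 0)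

def Spec_follow_course (course : List String) (start_x : Int) (start_y : Int) (out : Int × Int) : Prop := out = follow_course_alt course start_x start_y
instance (course : List String) (start_x : Int) (start_y : Int) (out : Int × Int) : Decidable (Spec_follow_course course start_x start_y out) := by unfold Spec_follow_course; infer_instance

-- ===== CLAIM (what is proved, stated in full; the proofs are below) =====
def Claim_equal_follow_course : Prop := ∀ (course : List String) (start_x : Int) (start_y : Int), Dom_follow_course course start_x start_y → Pre_follow_course course start_x start_y → Spec_follow_course course start_x start_y (follow_course course start_x start_y)

-- ===== LEMMAS AND PROOFS =====
theorem parse_b_eq (c : String) : parse_command_b c = parse_command c := rfl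

theorem follow_eq (course : List String) (start_x start_y : Int) :
    follow_course course start_x start_y = follow_course_alt course start_x start_y := by
  induction course generalizing start_x start_y with
  | nil => simp [follow_course, follow_course_alt]
  | cons c cs ih =>
    simp only [follow_course, follow_course_alt, List.foldl_cons, List.map_cons,
      List.filter_cons, parse_b_eq] at *
    rcases h : parse_command c with ⟨d, m⟩
    by_cases hu : d = "up" <;> by_cases hd : d = "down" <;> by_cases hf : d = "forward" <;>
      simp_all <;> ring

-- ===== VERDICT (by name: the statement is the Claim_ definition above) =====
theorem follow_course_spec : Claim_equal_follow_course := by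
  intro course sx sy _ _
  unfold Spec_follow_course
  exact follow_eq course sx sy
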